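-- pv_equiv track=rewrite | github.com/EFulmer/dailyprogrammer | challenge_139.py | pangram_ec
-- ===== SOURCE A (Python) =====
-- from collections import Counter
-- from string import ascii_lowercase
--
-- def pangram_ec(a_string):
--     lc_str = a_string.lower()
--     char_count = Counter(lc_str)
--     count_str = [ '{char}: {num}'.format(char=k, num=char_count[k])
--                   for k in sorted(list(set((char_count.elements()))))
--                   if k in ascii_lowercase ]
--     in_str = [ char in lc_str for char in ascii_lowercase ]
--     # not a fan of this + ' ' bit:
--     result_str = str(all(in_str)) + ' ' + ' '.join(count_str)
--     return result_str
-- ===== SOURCE B (Python) =====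
-- from string import ascii_lowercase
--
-- def pangram_ec(a_string):
--     # Single alphabet-ordered pass: count each letter once, build the parts
--     # and the pangram flag together.
--     lc = a_string.lower()
--     pangram = True
--     parts = []
--     for c in ascii_lowercase:
--         n = lc.count(c)
--         if n > 0:
--             parts.append(c + ': ' + str(n))
--         else:
--             pangram = False
--     return str(pangram) + ' ' + ' '.join(parts)
-- ===== Notes on version B (the rewrite author's own statement) =====
-- stated objective: simpler
-- what changed: Replaces the Counter/elements/set/sorted pipeline and the two separate comprehensions by one pass over ascii_lowercase that counts each letter (str.count), appends its part when present and tracks the pangram flag at the same time.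
import Mathlib
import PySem

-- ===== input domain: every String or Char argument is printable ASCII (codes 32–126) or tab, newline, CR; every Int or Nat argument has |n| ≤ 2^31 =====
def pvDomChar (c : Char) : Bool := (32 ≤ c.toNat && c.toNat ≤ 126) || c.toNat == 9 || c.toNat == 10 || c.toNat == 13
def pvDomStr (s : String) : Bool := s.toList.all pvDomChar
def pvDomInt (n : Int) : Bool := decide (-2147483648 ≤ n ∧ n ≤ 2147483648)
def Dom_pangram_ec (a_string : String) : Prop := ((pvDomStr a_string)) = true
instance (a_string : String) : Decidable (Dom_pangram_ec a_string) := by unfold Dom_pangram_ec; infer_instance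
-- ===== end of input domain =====

-- B replaces A's Counter/elements/set/sorted pipeline and two comprehensions by one
-- alphabet-ordered pass that counts each letter and builds the parts and the pangram
-- flag together (objective: simpler; same results).


-- string.ascii_lowercase
def asciiLowercase : List Char := "abcdefghijklmnopqrstuvwxyz".toList

-- ===== PORT A =====
def pangram_ec (a_string : String) : String :=
  let lc := PySem.Chars.lower a_string.toList
  let char_count := PySem.Dict.counter lc
  -- sorted(list(set(char_count.elements()))): elements() lists each key count-many
  -- times; sorted() fixes the (hash) order of the set
  let count_str := ((PySem.List.sorted (PySem.Set.ofList
        (char_count.items.flatMap (fun p => List.replicate p.2.toNat p.1))) id).filter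
        (fun k => PySem.Chars.isIn [k] asciiLowercase)).map
        (fun k => [k] ++ [':', ' '] ++ PySem.Int.toChars (char_count.getD k 0))
  let in_str := asciiLowercase.map (fun c => PySem.Chars.isIn [c] lc)
  String.ofList ((if in_str.all id then "True".toList else "False".toList) ++ [' ']
      ++ PySem.Chars.join [' '] count_str)

-- ===== PORT B =====
def pangram_ec_alt (a_string : String) : String :=
  let lc := PySem.Chars.lower a_string.toList
  let st := asciiLowercase.foldl (fun (acc : Bool × List (List Char)) c =>
      let n := PySem.Chars.count lc [c]
      if 0 < n then (acc.1, acc.2 ++ [[c] ++ [':', ' '] ++ PySem.Int.toChars (n : Int)])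
      else (false, acc.2)) (true, [])
  String.ofList ((if st.1 then "True".toList else "False".toList) ++ [' ']
      ++ PySem.Chars.join [' '] st.2)

-- ===== PRECONDITION & SPEC =====
def Spec_pangram_ec (a_string : String) (out : String) : Prop := out = pangram_ec_alt a_string
instance (a_string : String) (out : String) : Decidable (Spec_pangram_ec a_string out) := by unfold Spec_pangram_ec; infer_instance

-- ===== CLAIM (what is proved, stated in full; the proofs are below) =====
def Claim_equal_pangram_ec : Prop := ∀ (a_string : String), Dom_pangram_ec a_string → Spec_pangram_ec a_string (pangram_ec a_string)

-- ===== LEMMAS AND PROOFS =====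

-- s.count(c) for a single character c is the character count
theorem countgo_single (c : Char) : ∀ (l : List Char) (fuel acc : Nat), l.length ≤ fuel →
    PySem.Chars.count.go [c] fuel l acc = acc + l.count c := by
  intro l
  induction l with
  | nil => intro fuel acc h; cases fuel <;> simp [PySem.Chars.count.go]
  | cons h t ih =>
    intro fuel acc hle
    simp only [List.length_cons] at hle
    cases fuel with
    | zero => omega
    | succ f =>
      simp only [PySem.Chars.count.go, List.isPrefixOf, Bool.and_true]
      by_cases hc : c = h
      · subst hc
        simp [ih f (acc + 1) (by omega)]
        omega
      · simp [beq_iff_eq, hc, ih f acc (by omega), Ne.symm hc]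

theorem count_single (c : Char) (s : List Char) : PySem.Chars.count s [c] = s.count c := by
  simpa [PySem.Chars.count] using countgo_single c s s.length 0 le_rfl

-- 'c in s' for a single character is membership
theorem isIn_single (c : Char) (s : List Char) :
    PySem.Chars.isIn [c] s = decide (c ∈ s) := by
  by_cases h : c ∈ s
  · simp [PySem.Chars.isIn_iff_infix, List.singleton_infix_iff, h]
  · simp [h]
    simpa [PySem.Chars.isIn_eq_false_iff, List.singleton_infix_iff] using h

-- members of Counter(lc).elements() are exactly the members of lc
theorem mem_elements (lc : List Char) (x : Char) :
    x ∈ (PySem.Dict.counter lc).items.flatMap (fun p => List.replicate p.2.toNat p.1)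
      ↔ x ∈ lc := by
  simp only [PySem.Dict.items_counter, List.mem_flatMap, List.mem_map,
    PySem.Set.mem_ofList, List.mem_replicate]
  constructor
  · rintro ⟨p, ⟨a, ha, rfl⟩, _, rfl⟩; exact ha
  · intro hx
    exact ⟨(x, (lc.count x : Int)), ⟨x, hx, rfl⟩,
      by simp [(List.count_pos_iff.mpr hx).ne']⟩

-- the pangram-flag accumulator of B's loop
theorem flag_foldl (q : Char → Prop) [DecidablePred q] (l : List Char) (b : Bool) :
    l.foldl (fun ok c => if q c then ok else false) b
      = (b && l.all (fun c => decide (q c))) := by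
  induction l generalizing b with
  | nil => simp
  | cons h t ih =>
    rw [List.foldl_cons]
    by_cases hq : q h
    · rw [if_pos hq, ih]; simp [hq]
    · rw [if_neg hq, ih]; simp [hq]

-- A's sorted-set-filtered letter list equals B's alphabet-filtered letter list
theorem letters_eq (lc : List Char) :
    (PySem.List.sorted (PySem.Set.ofList
        ((PySem.Dict.counter lc).items.flatMap (fun p => List.replicate p.2.toNat p.1))) id).filter
        (fun k => PySem.Chars.isIn [k] asciiLowercase)
      = asciiLowercase.filter (fun c => decide (0 < lc.count c)) := by
  set E := (PySem.Dict.counter lc).items.flatMap (fun p => List.replicate p.2.toNat p.1) with hE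
  have hperm : (PySem.List.sorted (PySem.Set.ofList E) id).Perm (PySem.Set.ofList E) :=
    PySem.List.sorted_perm _ id false
  have hnodupL : (PySem.List.sorted (PySem.Set.ofList E) id).Nodup :=
    hperm.nodup_iff.mpr (PySem.Set.nodup_ofList E)
  have hmemL : ∀ x, x ∈ PySem.List.sorted (PySem.Set.ofList E) id ↔ x ∈ lc := by
    intro x
    rw [hperm.mem_iff, PySem.Set.mem_ofList, hE, mem_elements]
  have hsortL : (PySem.List.sorted (PySem.Set.ofList E) id).Pairwise (· < ·) := by
    have h1 := PySem.List.sorted_pairwise (PySem.Set.ofList E) (id : Char → Char)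
    have := (h1.and hnodupL)
    exact this.imp (fun h => lt_of_le_of_ne h.1 h.2)
  have hsortR : asciiLowercase.Pairwise (· < ·) := by decide
  apply List.Perm.eq_of_pairwise
      (fun a b _ _ h1 h2 => absurd h2 (lt_asymm h1))
      (hsortL.filter _) (hsortR.filter _)
  rw [List.perm_ext_iff_of_nodup (hnodupL.filter _) ((hsortR.imp ne_of_lt).filter _)]
  intro a
  simp only [List.mem_filter, hmemL, isIn_single, decide_eq_true_eq, List.count_pos_iff]
  exact and_comm

theorem core_eq (lc : List Char) :
    String.ofList ((if (asciiLowercase.map (fun c => PySem.Chars.isIn [c] lc)).all id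
        then "True".toList else "False".toList) ++ [' ']
      ++ PySem.Chars.join [' ']
        (((PySem.List.sorted (PySem.Set.ofList
            ((PySem.Dict.counter lc).items.flatMap (fun p => List.replicate p.2.toNat p.1))) id).filter
            (fun k => PySem.Chars.isIn [k] asciiLowercase)).map
            (fun k => [k] ++ [':', ' '] ++ PySem.Int.toChars ((PySem.Dict.counter lc).getD k 0))))
    = String.ofList ((if (asciiLowercase.foldl (fun (acc : Bool × List (List Char)) c =>
          if 0 < PySem.Chars.count lc [c]
          then (acc.1, acc.2 ++ [[c] ++ [':', ' '] ++ PySem.Int.toChars ((PySem.Chars.count lc [c] : Nat) : Int)])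
          else (false, acc.2)) (true, [])).1 then "True".toList else "False".toList) ++ [' ']
      ++ PySem.Chars.join [' '] (asciiLowercase.foldl (fun (acc : Bool × List (List Char)) c =>
          if 0 < PySem.Chars.count lc [c]
          then (acc.1, acc.2 ++ [[c] ++ [':', ' '] ++ PySem.Int.toChars ((PySem.Chars.count lc [c] : Nat) : Int)])
          else (false, acc.2)) (true, [])).2) := by
  -- split B's fold into the flag fold and the parts fold
  have hsplit : asciiLowercase.foldl (fun (acc : Bool × List (List Char)) c =>
      if 0 < PySem.Chars.count lc [c]
      then (acc.1, acc.2 ++ [[c] ++ [':', ' '] ++ PySem.Int.toChars ((PySem.Chars.count lc [c] : Nat) : Int)])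
      else (false, acc.2)) (true, []) =
      (asciiLowercase.foldl (fun ok c => if 0 < PySem.Chars.count lc [c] then ok else false) true,
       asciiLowercase.foldl (fun parts c => if 0 < PySem.Chars.count lc [c] then
          parts ++ [[c] ++ [':', ' '] ++ PySem.Int.toChars ((PySem.Chars.count lc [c] : Nat) : Int)]
          else parts) []) := by
    have h1 := PySem.List.foldl_congr_mem
        (l := asciiLowercase) (init := ((true : Bool), ([] : List (List Char))))
        (f := fun (acc : Bool × List (List Char)) c =>
          if 0 < PySem.Chars.count lc [c]
          then (acc.1, acc.2 ++ [[c] ++ [':', ' '] ++ PySem.Int.toChars ((PySem.Chars.count lc [c] : Nat) : Int)])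
          else (false, acc.2))
        (g := fun (acc : Bool × List (List Char)) c =>
          ((fun ok c => if 0 < PySem.Chars.count lc [c] then ok else false) acc.1 c,
           (fun parts c => if 0 < PySem.Chars.count lc [c] then
              parts ++ [[c] ++ [':', ' '] ++ PySem.Int.toChars ((PySem.Chars.count lc [c] : Nat) : Int)]
              else parts) acc.2 c))
        (by intro acc x _; by_cases h : 0 < PySem.Chars.count lc [x] <;> simp [h])
    exact h1.trans (PySem.List.foldl_prod_mk
      (f := fun ok c => if 0 < PySem.Chars.count lc [c] then ok else false)
      (g := fun parts c => if 0 < PySem.Chars.count lc [c] then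
          parts ++ [[c] ++ [':', ' '] ++ PySem.Int.toChars ((PySem.Chars.count lc [c] : Nat) : Int)]
          else parts)
      asciiLowercase true [])
  rw [hsplit]
  -- the two flags agree
  have hflag : (asciiLowercase.map (fun c => PySem.Chars.isIn [c] lc)).all id
      = asciiLowercase.foldl (fun ok c => if 0 < PySem.Chars.count lc [c] then ok else false) true := by
    rw [flag_foldl (fun c => 0 < PySem.Chars.count lc [c]) asciiLowercase true]
    simp [List.all_map, isIn_single, count_single, List.count_pos_iff]
  -- the two parts lists agree
  have hparts : ((PySem.List.sorted (PySem.Set.ofList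
        ((PySem.Dict.counter lc).items.flatMap (fun p => List.replicate p.2.toNat p.1))) id).filter
        (fun k => PySem.Chars.isIn [k] asciiLowercase)).map
        (fun k => [k] ++ [':', ' '] ++ PySem.Int.toChars ((PySem.Dict.counter lc).getD k 0))
      = asciiLowercase.foldl (fun parts c => if 0 < PySem.Chars.count lc [c] then
          parts ++ [[c] ++ [':', ' '] ++ PySem.Int.toChars ((PySem.Chars.count lc [c] : Nat) : Int)]
          else parts) [] := by
    rw [PySem.List.foldl_append_ite (p := fun c => 0 < PySem.Chars.count lc [c])
      (f := fun c => [c] ++ [':', ' '] ++ PySem.Int.toChars ((PySem.Chars.count lc [c] : Nat) : Int))]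
    rw [List.nil_append]
    rw [show (fun c => decide (0 < PySem.Chars.count lc [c]))
        = (fun c => decide (0 < lc.count c)) from funext fun c => by rw [count_single]]
    rw [letters_eq lc]
    apply List.map_congr_left
    intro k hk
    simp only [List.mem_filter, decide_eq_true_eq] at hk
    simp [PySem.Dict.getD_counter, count_single]
  rw [hflag, hparts]

-- ===== VERDICT (by name: the statement is the Claim_ definition above) =====
theorem pangram_ec_spec : Claim_equal_pangram_ec := by
  intro a_string _
  unfold Spec_pangram_ec
  exact core_eq (PySem.Chars.lower a_string.toList)
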